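-- pv_equiv track=rewrite | github.com/kvrancic/nlp-project | src/data.py | format_prompt_gemma_it
-- ===== SOURCE A (Python) =====
-- def format_prompt_gemma_it(question: str, few_shot_examples: list[dict] | None = None) -> str:
--     """Format a question for Gemma 3 IT using the chat template.
--
--     Uses the Gemma 3 IT chat format:
--     <start_of_turn>user
--     {question}<end_of_turn>
--     <start_of_turn>model
--     """
--     messages = []
--
--     if few_shot_examples:
--         for ex in few_shot_examples:
--             messages.append({"role": "user", "content": ex["question"]})
--             messages.append({"role": "assistant", "content": ex["answer"]})
--
--     messages.append({"role": "user", "content": question})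
--
--     # Build the raw chat format (tokenizer.apply_chat_template is preferred
--     # when a tokenizer is available, but this works for display/debugging)
--     parts = []
--     for msg in messages:
--         if msg["role"] == "user":
--             parts.append(f"<start_of_turn>user\n{msg['content']}<end_of_turn>")
--         elif msg["role"] == "assistant":
--             parts.append(f"<start_of_turn>model\n{msg['content']}<end_of_turn>")
--     parts.append("<start_of_turn>model\n")
--     return "\n".join(parts)
-- ===== SOURCE B (Python) =====
-- def format_prompt_gemma_it(question: str, few_shot_examples: list[dict] | None = None) -> str:
--     parts = []
--     if few_shot_examples:
--         for ex in few_shot_examples: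
--             parts.append(f"<start_of_turn>user\n{ex['question']}<end_of_turn>")
--             parts.append(f"<start_of_turn>model\n{ex['answer']}<end_of_turn>")
--     parts.append(f"<start_of_turn>user\n{question}<end_of_turn>")
--     parts.append("<start_of_turn>model\n")
--     return "\n".join(parts)
-- ===== Notes on version B (the rewrite author's own statement) =====
-- stated objective: simpler
-- what changed: B drops A's intermediate role/content messages list and the role-dispatch loop, formatting each few-shot turn (and the question's turn) directly into the parts list in one pass.
import Mathlib
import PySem

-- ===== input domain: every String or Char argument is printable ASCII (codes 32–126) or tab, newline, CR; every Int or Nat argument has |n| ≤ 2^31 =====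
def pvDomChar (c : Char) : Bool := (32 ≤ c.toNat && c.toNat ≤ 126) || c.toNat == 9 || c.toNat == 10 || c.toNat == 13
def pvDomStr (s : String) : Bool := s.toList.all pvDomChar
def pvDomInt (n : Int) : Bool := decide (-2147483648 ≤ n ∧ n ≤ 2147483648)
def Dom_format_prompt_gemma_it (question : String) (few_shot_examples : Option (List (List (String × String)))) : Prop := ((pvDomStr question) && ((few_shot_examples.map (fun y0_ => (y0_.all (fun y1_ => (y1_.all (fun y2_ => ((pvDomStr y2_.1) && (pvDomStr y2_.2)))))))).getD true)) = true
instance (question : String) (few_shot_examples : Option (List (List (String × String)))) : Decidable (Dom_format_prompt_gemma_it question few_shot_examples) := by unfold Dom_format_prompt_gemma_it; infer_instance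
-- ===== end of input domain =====

-- B drops A's intermediate role/content messages list and the role-dispatch loop,
-- formatting each turn directly into the parts list in one pass (objective: simpler).


-- ===== PORT A =====
-- A: build the messages list of (role, content) pairs, then dispatch on the role
-- to build parts, then join.  ex["question"] / ex["answer"] is first-match lookup;
-- the .getD "" default is unreachable under Pre_ (Python raises KeyError there).
def format_prompt_gemma_it (question : String) (few_shot_examples : Option (List (List (String × String)))) : String :=
  let messages : List (String × String) :=
    match few_shot_examples with
    | some exs =>
      if exs.isEmpty then []
      else exs.foldl (fun acc ex =>
        (acc ++ [("user", (List.lookup "question" ex).getD "")])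
            ++ [("assistant", (List.lookup "answer" ex).getD "")]) []
    | none => []
  let messages := messages ++ [("user", question)]
  let parts : List String := messages.foldl (fun acc msg =>
    if msg.1 == "user" then acc ++ ["<start_of_turn>user\n" ++ msg.2 ++ "<end_of_turn>"]
    else if msg.1 == "assistant" then acc ++ ["<start_of_turn>model\n" ++ msg.2 ++ "<end_of_turn>"]
    else acc) []
  let parts := parts ++ ["<start_of_turn>model\n"]
  PySem.Str.join "\n" parts

-- ===== PORT B =====
-- B: format each few-shot example directly into two parts, append the question's
-- user turn and the trailing model header, and join.
def format_prompt_gemma_it_alt (question : String) (few_shot_examples : Option (List (List (String × String)))) : String :=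
  let parts : List String :=
    (match few_shot_examples with
     | some exs => exs.flatMap (fun ex =>
        ["<start_of_turn>user\n" ++ (List.lookup "question" ex).getD "" ++ "<end_of_turn>",
         "<start_of_turn>model\n" ++ (List.lookup "answer" ex).getD "" ++ "<end_of_turn>"])
     | none => [])
    ++ ["<start_of_turn>user\n" ++ question ++ "<end_of_turn>", "<start_of_turn>model\n"]
  PySem.Str.join "\n" parts

-- ===== PRECONDITION & SPEC =====
-- Pre_ excludes only inputs on which the Python A RAISES KeyError: an example
-- missing the "question" or "answer" key (B raises there identically).
def Pre_format_prompt_gemma_it (question : String) (few_shot_examples : Option (List (List (String × String)))) : Prop :=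
  ∀ ex ∈ few_shot_examples.getD [], (List.lookup "question" ex).isSome ∧ (List.lookup "answer" ex).isSome
instance (question : String) (few_shot_examples : Option (List (List (String × String)))) : Decidable (Pre_format_prompt_gemma_it question few_shot_examples) := by unfold Pre_format_prompt_gemma_it; infer_instance
def pvWitness_format_prompt_gemma_it : String × (Option (List (List (String × String)))) :=
  ("What is 2+2?", some [[("question", "1+1?"), ("answer", "2")]])
def Spec_format_prompt_gemma_it (question : String) (few_shot_examples : Option (List (List (String × String)))) (out : String) : Prop := out = format_prompt_gemma_it_alt question few_shot_examples
instance (question : String) (few_shot_examples : Option (List (List (String × String)))) (out : String) : Decidable (Spec_format_prompt_gemma_it question few_shot_examples out) := by unfold Spec_format_prompt_gemma_it; infer_instance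

-- ===== CLAIM (what is proved, stated in full; the proofs are below) =====
def Claim_equal_format_prompt_gemma_it : Prop := ∀ (question : String) (few_shot_examples : Option (List (List (String × String)))), Dom_format_prompt_gemma_it question few_shot_examples → Pre_format_prompt_gemma_it question few_shot_examples → Spec_format_prompt_gemma_it question few_shot_examples (format_prompt_gemma_it question few_shot_examples)

-- ===== LEMMAS AND PROOFS =====

-- A's messages-build loop produces exactly the flatMap of (user, assistant) pairs.
theorem pv_messages_eq (exs : List (List (String × String))) (acc : List (String × String)) :
    exs.foldl (fun acc ex =>
        (acc ++ [("user", (List.lookup "question" ex).getD "")])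
            ++ [("assistant", (List.lookup "answer" ex).getD "")]) acc
      = acc ++ exs.flatMap (fun ex =>
          [("user", (List.lookup "question" ex).getD ""),
           ("assistant", (List.lookup "answer" ex).getD "")]) := by
  induction exs generalizing acc with
  | nil => simp
  | cons ex rest ih => rw [List.foldl_cons, ih]; simp

-- A's role-dispatch loop over a flatMap-shaped messages list produces B's few-shot parts.
theorem pv_parts_eq (exs : List (List (String × String))) (acc : List String) :
    ((exs.flatMap (fun ex =>
        [(("user" : String), (List.lookup "question" ex).getD ""),
         ("assistant", (List.lookup "answer" ex).getD "")])).foldl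
      (fun acc msg =>
        if msg.1 == "user" then acc ++ ["<start_of_turn>user
" ++ msg.2 ++ "<end_of_turn>"]
        else if msg.1 == "assistant" then acc ++ ["<start_of_turn>model
" ++ msg.2 ++ "<end_of_turn>"]
        else acc) acc)
      = acc ++ exs.flatMap (fun ex =>
          ["<start_of_turn>user
" ++ (List.lookup "question" ex).getD "" ++ "<end_of_turn>",
           "<start_of_turn>model
" ++ (List.lookup "answer" ex).getD "" ++ "<end_of_turn>"]) := by
  induction exs generalizing acc with
  | nil => simp
  | cons ex rest ih =>
    simp only [List.flatMap_cons, List.cons_append, List.nil_append, List.foldl_cons]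
    rw [ih]; simp

-- ===== VERDICT (by name: the statement is the Claim_ definition above) =====
theorem format_prompt_gemma_it_spec : Claim_equal_format_prompt_gemma_it := by
  intro question fse _hDom _hPre
  unfold Spec_format_prompt_gemma_it format_prompt_gemma_it format_prompt_gemma_it_alt
  cases fse with
  | none => simp
  | some exs =>
    by_cases h : exs.isEmpty
    · simp_all [List.isEmpty_iff.mp h]
    · simp only [h, Bool.false_eq_true, if_false, pv_messages_eq, List.nil_append,
        List.foldl_append, pv_parts_eq, List.foldl_cons, List.foldl_nil]
      simp
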